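-- pv_equiv track=rewrite | github.com/NicolleLouis/theolex | back/prediction/services/import_service/mail_import_service.py | get_index_last_non_null_line
-- ===== SOURCE A (Python) =====
-- def get_index_last_non_null_line(text_by_lines):
--     try:
--         index = len(text_by_lines) - 1
--         while text_by_lines[index] == "":
--             index -= 1
--         return index
--     except:
--         return len(text_by_lines) - 1
-- ===== SOURCE B (Python) =====
-- def get_index_last_non_null_line(text_by_lines):
--     non_null_indices = [i for i, line in enumerate(text_by_lines) if line != ""]
--     if non_null_indices:
--         return non_null_indices[-1]
--     return len(text_by_lines) - 1
-- ===== Notes on version B (the rewrite author's own statement) =====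
-- stated objective: simpler
-- what changed: Replaces the backward while-loop with try/except and negative-index wraparound by a forward enumerate pass collecting indices of non-empty lines and taking the last one (defaulting to len-1).
import Mathlib
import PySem

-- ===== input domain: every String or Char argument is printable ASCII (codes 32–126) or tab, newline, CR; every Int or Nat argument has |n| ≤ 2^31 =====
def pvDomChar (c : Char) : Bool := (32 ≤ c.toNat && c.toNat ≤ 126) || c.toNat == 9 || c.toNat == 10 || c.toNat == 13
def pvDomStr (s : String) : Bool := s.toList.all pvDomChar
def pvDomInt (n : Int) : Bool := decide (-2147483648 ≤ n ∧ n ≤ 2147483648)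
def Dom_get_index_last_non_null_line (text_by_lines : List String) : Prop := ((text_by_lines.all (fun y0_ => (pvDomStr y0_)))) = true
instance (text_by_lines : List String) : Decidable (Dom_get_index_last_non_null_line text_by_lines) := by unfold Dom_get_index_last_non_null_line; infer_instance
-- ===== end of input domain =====

-- B replaces A's backward while-loop (try/except, Python negative-index wraparound)
-- by a forward enumerate pass collecting non-empty-line indices; objective: simpler.

-- ===== PORT A =====
-- A's while loop: index counts down; out-of-range access (IndexError) hits the
-- bare `except:` and returns len-1.
def pvLoopA (xs : List String) (index : Int) : Int :=
  match h : PySem.List.pyGet? xs index with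
  | none => (xs.length : Int) - 1          -- IndexError → except branch
  | some s => if s = "" then pvLoopA xs (index - 1) else index
termination_by (index + xs.length + 1).toNat
decreasing_by
  have hin : PySem.Raise.InRange xs.length index := by
    by_contra hc
    rw [← PySem.List.pyGet?_eq_none_iff] at hc
    simp [hc] at h
  unfold PySem.Raise.InRange at hin
  omega

def get_index_last_non_null_line (text_by_lines : List String) : Int :=
  pvLoopA text_by_lines ((text_by_lines.length : Int) - 1)

-- ===== PORT B =====
def get_index_last_non_null_line_alt (text_by_lines : List String) : Int :=
  let nonNull := ((PySem.List.enumerate text_by_lines 0).filter (fun p => p.2 != "")).map (·.1)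
  match nonNull.getLast? with
  | some i => i
  | none => (text_by_lines.length : Int) - 1

-- ===== PRECONDITION & SPEC =====
def Spec_get_index_last_non_null_line (text_by_lines : List String) (out : Int) : Prop := out = get_index_last_non_null_line_alt text_by_lines
instance (text_by_lines : List String) (out : Int) : Decidable (Spec_get_index_last_non_null_line text_by_lines out) := by unfold Spec_get_index_last_non_null_line; infer_instance

-- ===== CLAIM (what is proved, stated in full; the proofs are below) =====
def Claim_equal_get_index_last_non_null_line : Prop := ∀ (text_by_lines : List String), Dom_get_index_last_non_null_line text_by_lines → Spec_get_index_last_non_null_line text_by_lines (get_index_last_non_null_line text_by_lines)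

-- ===== LEMMAS AND PROOFS =====

-- Unfolding lemmas for A's loop (one per branch of the match).
theorem pvLoopA_none (xs : List String) (index : Int)
    (h : PySem.List.pyGet? xs index = none) : pvLoopA xs index = (xs.length : Int) - 1 := by
  rw [pvLoopA]; split
  · rfl
  · next s heq => rw [h] at heq; cases heq

theorem pvLoopA_step (xs : List String) (index : Int)
    (h : PySem.List.pyGet? xs index = some "") : pvLoopA xs index = pvLoopA xs (index - 1) := by
  rw [pvLoopA]; split
  · next heq => rw [h] at heq; cases heq
  · next t heq => rw [h] at heq; cases heq; simp

theorem pvLoopA_stop (xs : List String) (index : Int) (s : String)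
    (h : PySem.List.pyGet? xs index = some s) (hs : s ≠ "") : pvLoopA xs index = index := by
  rw [pvLoopA]; split
  · next heq => rw [h] at heq; cases heq
  · next t heq => rw [h] at heq; cases heq; simp [hs]

-- If every line is empty, A's loop runs off the front and returns len-1.
theorem pvLoopA_all_empty (xs : List String) (index : Int)
    (hall : ∀ s ∈ xs, s = "") : pvLoopA xs index = (xs.length : Int) - 1 := by
  induction index using pvLoopA.induct xs with
  | case1 index h => exact pvLoopA_none xs index h
  | case2 index h ih => rw [pvLoopA_step xs index h]; exact ih
  | case3 index s h hs =>
      exact absurd (hall s (PySem.List.mem_of_pyGet?_eq_some _ h)) hs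

-- If every line is empty, B returns len-1.
theorem alt_all_empty (xs : List String) (hall : ∀ s ∈ xs, s = "") :
    get_index_last_non_null_line_alt xs = (xs.length : Int) - 1 := by
  unfold get_index_last_non_null_line_alt
  have hf : (PySem.List.enumerate xs 0).filter (fun p => p.2 != "") = [] := by
    apply List.filter_eq_nil_iff.mpr
    intro p hp
    rcases (PySem.List.mem_enumerate_iff _ _ _).mp hp with ⟨k, hk, rfl⟩
    simp [hall xs[k] (List.getElem_mem hk)]
  simp [hf]

-- If xs[k] is non-empty and everything after k is empty, B returns k.
theorem alt_last (xs : List String) (k : Nat) (hk : k < xs.length)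
    (hne : xs[k] ≠ "") (hsuf : ∀ j, k < j → (hj : j < xs.length) → xs[j] = "") :
    get_index_last_non_null_line_alt xs = (k : Int) := by
  unfold get_index_last_non_null_line_alt
  have hsplit : xs = xs.take k ++ xs[k] :: xs.drop (k + 1) := by
    conv_lhs => rw [← List.take_append_drop k xs]
    rw [List.drop_eq_getElem_cons hk]
  have hlen : (xs.take k).length = k := List.length_take_of_le (le_of_lt hk)
  have hdrop : (PySem.List.enumerate (xs.drop (k + 1)) ((0 : Int) + (xs.take k).length + 1)).filter
      (fun p => p.2 != "") = [] := by
    apply List.filter_eq_nil_iff.mpr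
    intro p hp
    rcases (PySem.List.mem_enumerate_iff _ _ _).mp hp with ⟨m, hm, rfl⟩
    have hmlen : k + 1 + m < xs.length := by
      have := List.length_drop (l := xs) (i := k + 1); omega
    have : (xs.drop (k + 1))[m] = xs[k + 1 + m] := by
      simp [List.getElem_drop]
    simp [this, hsuf (k + 1 + m) (by omega) hmlen]
  conv_lhs => rw [hsplit]
  rw [PySem.List.enumerate_append, PySem.List.enumerate_cons]
  rw [List.filter_append]
  simp only [List.filter_cons, hdrop]
  simp [hne, hlen]

-- A's loop, started at index with everything strictly after index empty, agrees with B.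
theorem pvLoopA_eq_alt (xs : List String) (index : Nat) (hlt : index < xs.length)
    (hsuf : ∀ j, index < j → (hj : j < xs.length) → xs[j] = "") :
    pvLoopA xs (index : Int) = get_index_last_non_null_line_alt xs := by
  induction index with
  | zero =>
      by_cases h0 : xs[0] = ""
      · have hall : ∀ s ∈ xs, s = "" := by
          intro s hs
          rcases List.mem_iff_getElem.mp hs with ⟨j, hj, rfl⟩
          rcases Nat.eq_zero_or_pos j with rfl | hjp
          · exact h0
          · exact hsuf j hjp hj
        rw [pvLoopA_all_empty xs _ hall, alt_all_empty xs hall]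
      · have hget : PySem.List.pyGet? xs ((0 : Nat) : Int) = some xs[0] := by
          rw [PySem.List.pyGet?_natCast, List.getElem?_eq_getElem hlt]
        rw [pvLoopA_stop xs _ _ hget h0]
        exact (alt_last xs 0 hlt h0 hsuf).symm
  | succ n ih =>
      have hget : PySem.List.pyGet? xs ((n + 1 : Nat) : Int) = some xs[n + 1] := by
        rw [PySem.List.pyGet?_natCast, List.getElem?_eq_getElem hlt]
      by_cases h0 : xs[n + 1] = ""
      · rw [h0] at hget
        rw [pvLoopA_step xs _ hget]
        have hcast : ((n + 1 : Nat) : Int) - 1 = (n : Int) := by push_cast; ring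
        rw [hcast]
        exact ih (by omega) (fun j hj hjl => by
          by_cases hje : j = n + 1
          · exact hje ▸ h0
          · exact hsuf j (by omega) hjl)
      · rw [pvLoopA_stop xs _ _ hget h0]
        exact (alt_last xs (n + 1) hlt h0 hsuf).symm

-- ===== VERDICT (by name: the statement is the Claim_ definition above) =====
theorem get_index_last_non_null_line_spec : Claim_equal_get_index_last_non_null_line := by
  intro xs _
  unfold Spec_get_index_last_non_null_line get_index_last_non_null_line
  rcases xs with _ | ⟨a, tl⟩
  · rw [show ((([] : List String).length : Int) - 1) = (-1 : Int) by simp]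
    rw [pvLoopA_none [] (-1) (by decide)]
    rfl
  · have hlen : ((a :: tl).length : Int) - 1 = ((tl.length : Nat) : Int) := by
      simp
    rw [hlen]
    exact pvLoopA_eq_alt (a :: tl) tl.length (by simp)
      (fun j hj hjl => by simp at hjl; omega)
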